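-- pv_equiv track=rewrite | github.com/makemyway-kr/cote | Programmers_code_challenge1/absolute_sign.py | if_right
-- ===== SOURCE A (Python) =====
-- def if_right(s):#각각의 괄호 배열에 괄호의 위치들을 추가함. 괄호의 갯수가 동일하지 않거나 오른쪽 괄호( ")" 등)이 왼쪽 괄호보다 먼저나오면 완벽한 괄호문장이아님.
--     ans=True
--     bigflag=[[],[]]
--     midflag=[[],[]]
--     smallflag=[[],[]]
--     for k in range(len(s)):
--         if s[k]=="(":
--             smallflag[0].append(k)
--         elif s[k]==")":
--             smallflag[1].append(k)
--         elif s[k]=="{":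
--             midflag[0].append(k)
--         elif s[k]=="}":
--             midflag[1].append(k)
--         elif s[k]=="[":
--             bigflag[0].append(k)
--         elif s[k]=="]":
--             bigflag[1].append(k)
--     if len(smallflag[0])!=len(smallflag[1]) or len(midflag[0])!=len(midflag[1]) or len(bigflag[0])!=len(bigflag[1]):
--         ans=False
--     else:
--         for k in range(len(smallflag[0])):
--             if smallflag[0][k]>smallflag[1][k]:
--                 ans=False
--
--         for k in range(len(midflag[0])):
--             if midflag[0][k]>midflag[1][k]:
--                 ans=False
--
--         for k in range(len(bigflag[0])):
--             if bigflag[0][k]>bigflag[1][k]: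
--                 ans=False
--
--     return ans
-- ===== SOURCE B (Python) =====
-- def if_right(s):
--     # One pass with three running balances instead of building position lists.
--     p = b = q = 0  # (), {}, []
--     ok = True
--     for ch in s:
--         if ch == '(':
--             p += 1
--         elif ch == ')':
--             p -= 1
--             if p < 0:
--                 ok = False
--         elif ch == '{':
--             b += 1
--         elif ch == '}':
--             b -= 1
--             if b < 0:
--                 ok = False
--         elif ch == '[':
--             q += 1
--         elif ch == ']':
--             q -= 1
--             if q < 0:
--                 ok = False
--     return ok and p == 0 and b == 0 and q == 0
-- ===== Notes on version B (the rewrite author's own statement) =====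
-- stated objective: simpler
-- what changed: Replaces A's six position lists plus three post-hoc index-comparison loops with a single left-to-right scan keeping one running balance per bracket type and a flag for a balance ever going negative (no list building, O(1) extra space).
import Mathlib
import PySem

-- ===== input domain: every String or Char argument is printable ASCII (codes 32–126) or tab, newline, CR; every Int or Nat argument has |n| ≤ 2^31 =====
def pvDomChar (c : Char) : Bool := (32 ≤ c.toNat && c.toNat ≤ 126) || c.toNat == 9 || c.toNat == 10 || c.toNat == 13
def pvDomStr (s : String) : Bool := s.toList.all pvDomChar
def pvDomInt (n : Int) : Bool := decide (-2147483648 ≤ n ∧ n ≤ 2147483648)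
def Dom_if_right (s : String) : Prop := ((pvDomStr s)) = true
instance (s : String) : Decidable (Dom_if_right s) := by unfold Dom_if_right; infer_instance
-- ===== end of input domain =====

-- B replaces A's six position lists and three post-hoc index-comparison loops by a single
-- scan with one running balance per bracket type (simpler, O(1) extra space; same O(n) time).

-- ===== PORT A =====
-- loop body: appends the index k to the open/close position list of the matching bracket type
def pvAStep (st : (List Int × List Int) × (List Int × List Int) × (List Int × List Int))
    (kc : Int × Char) : (List Int × List Int) × (List Int × List Int) × (List Int × List Int) :=
  let bg := st.1; let md := st.2.1; let sm := st.2.2; let k := kc.1; let ch := kc.2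
  if ch = '(' then (bg, md, (sm.1 ++ [k], sm.2))
  else if ch = ')' then (bg, md, (sm.1, sm.2 ++ [k]))
  else if ch = '{' then (bg, (md.1 ++ [k], md.2), sm)
  else if ch = '}' then (bg, (md.1, md.2 ++ [k]), sm)
  else if ch = '[' then ((bg.1 ++ [k], bg.2), md, sm)
  else if ch = ']' then ((bg.1, bg.2 ++ [k]), md, sm)
  else st

-- one of A's three "for k in range(len(...)): if open[k] > close[k]: ans = False" loops
def pvACheckLoop (O C : List Int) (ans : Bool) : Bool :=
  (List.range O.length).foldl (fun a k => if O.getD k 0 > C.getD k 0 then false else a) ans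

-- the code after A's scanning loop
def pvVerdictA (st : (List Int × List Int) × (List Int × List Int) × (List Int × List Int)) : Bool :=
  let bg := st.1; let md := st.2.1; let sm := st.2.2
  if sm.1.length ≠ sm.2.length ∨ md.1.length ≠ md.2.length ∨ bg.1.length ≠ bg.2.length then false
  else pvACheckLoop bg.1 bg.2 (pvACheckLoop md.1 md.2 (pvACheckLoop sm.1 sm.2 true))

def if_right (s : String) : Bool :=
  pvVerdictA ((PySem.List.enumerate s.toList).foldl pvAStep (([], []), ([], []), ([], [])))

-- ===== PORT B =====
-- loop body: running balance p/b/q per bracket type, ok cleared when a balance drops below 0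
def pvBStep (st : Int × Int × Int × Bool) (ch : Char) : Int × Int × Int × Bool :=
  let p := st.1; let b := st.2.1; let q := st.2.2.1; let ok := st.2.2.2
  if ch = '(' then (p + 1, b, q, ok)
  else if ch = ')' then (p - 1, b, q, if p - 1 < 0 then false else ok)
  else if ch = '{' then (p, b + 1, q, ok)
  else if ch = '}' then (p, b - 1, q, if b - 1 < 0 then false else ok)
  else if ch = '[' then (p, b, q + 1, ok)
  else if ch = ']' then (p, b, q - 1, if q - 1 < 0 then false else ok)
  else st

-- B's final "return ok and p == 0 and b == 0 and q == 0"
def pvVerdictB (st : Int × Int × Int × Bool) : Bool :=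
  st.2.2.2 && decide (st.1 = 0) && decide (st.2.1 = 0) && decide (st.2.2.1 = 0)

def if_right_alt (s : String) : Bool :=
  pvVerdictB (s.toList.foldl pvBStep (0, 0, 0, true))

-- ===== PRECONDITION & SPEC =====
def Spec_if_right (s : String) (out : Bool) : Prop := out = if_right_alt s
instance (s : String) (out : Bool) : Decidable (Spec_if_right s out) := by unfold Spec_if_right; infer_instance

-- ===== CLAIM (what is proved, stated in full; the proofs are below) =====
def Claim_equal_if_right : Prop := ∀ (s : String), Dom_if_right s → Spec_if_right s (if_right s)

-- ===== LEMMAS AND PROOFS =====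

-- "every close already has a strictly earlier matching open"
def pvOkSpec (O C : List Int) : Prop :=
  ∀ j, (hj : j < C.length) → ∃ h : j < O.length, O[j] < C[j]

-- per-type invariant tying A's position lists to B's balance n, indices all below k0
def pvInvT (O C : List Int) (n : Int) (k0 : Int) : Prop :=
  n = (O.length : Int) - C.length ∧ (∀ x ∈ O, x < k0) ∧ (∀ x ∈ C, x < k0) ∧ (∀ x ∈ O, x ∉ C)

theorem pvInvT_open {O C : List Int} {n k0 : Int} (h : pvInvT O C n k0) :
    pvInvT (O ++ [k0]) C (n + 1) (k0 + 1) := by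
  obtain ⟨h1, h2, h3, h4⟩ := h
  refine ⟨by simp only [List.length_append, List.length_singleton]; omega, ?_, ?_, ?_⟩
  · intro x hx; rcases List.mem_append.1 hx with hx | hx
    · exact lt_trans (h2 x hx) (by omega)
    · simp at hx; omega
  · intro x hx; exact lt_trans (h3 x hx) (by omega)
  · intro x hx; rcases List.mem_append.1 hx with hx | hx
    · exact h4 x hx
    · simp at hx; subst hx; intro hc; exact absurd (h3 _ hc) (by omega)

theorem pvInvT_close {O C : List Int} {n k0 : Int} (h : pvInvT O C n k0) :
    pvInvT O (C ++ [k0]) (n - 1) (k0 + 1) := by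
  obtain ⟨h1, h2, h3, h4⟩ := h
  refine ⟨by simp only [List.length_append, List.length_singleton]; omega, ?_, ?_, ?_⟩
  · intro x hx; exact lt_trans (h2 x hx) (by omega)
  · intro x hx; rcases List.mem_append.1 hx with hx | hx
    · exact lt_trans (h3 x hx) (by omega)
    · simp at hx; omega
  · intro x hx hc; rcases List.mem_append.1 hc with hc | hc
    · exact h4 x hx hc
    · simp at hc; subst hc; exact absurd (h2 _ hx) (by omega)

theorem pvInvT_skip {O C : List Int} {n k0 : Int} (h : pvInvT O C n k0) :
    pvInvT O C n (k0 + 1) := by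
  obtain ⟨h1, h2, h3, h4⟩ := h
  exact ⟨h1, fun x hx => lt_trans (h2 x hx) (by omega),
         fun x hx => lt_trans (h3 x hx) (by omega), h4⟩

theorem pvOkSpec_open {O C : List Int} {k0 : Int} (hC : ∀ x ∈ C, x < k0) :
    pvOkSpec (O ++ [k0]) C ↔ pvOkSpec O C := by
  constructor
  · intro h j hj
    obtain ⟨hlen, hlt⟩ := h j hj
    have hgl : j < O.length := by
      by_contra hn
      have hj' : j = O.length := by simp at hlen; omega
      subst hj'
      rw [List.getElem_append_right (le_refl _)] at hlt
      simp at hlt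
      exact absurd (hC _ (by exact List.getElem_mem hj)) (by omega)
    exact ⟨hgl, by rwa [List.getElem_append_left hgl] at hlt⟩
  · intro h j hj
    obtain ⟨hlen, hlt⟩ := h j hj
    exact ⟨by simp; omega, by rwa [List.getElem_append_left hlen]⟩

theorem pvOkSpec_close {O C : List Int} {k0 : Int} (hO : ∀ x ∈ O, x < k0) :
    pvOkSpec O (C ++ [k0]) ↔ (pvOkSpec O C ∧ C.length < O.length) := by
  constructor
  · intro h
    refine ⟨?_, ?_⟩
    · intro j hj
      obtain ⟨hlen, hlt⟩ := h j (by simp; omega)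
      exact ⟨hlen, by rwa [List.getElem_append_left hj] at hlt⟩
    · exact (h C.length (by simp)).1
  · rintro ⟨h, hlen⟩ j hj
    simp at hj
    rcases Nat.lt_or_ge j C.length with hj' | hj'
    · obtain ⟨hl, hlt⟩ := h j hj'
      exact ⟨hl, by rwa [List.getElem_append_left hj']⟩
    · have hj'' : j = C.length := by omega
      subst hj''
      refine ⟨hlen, ?_⟩
      rw [List.getElem_append_right (le_refl _)]
      simpa using hO _ (List.getElem_mem hlen)

theorem pvFoldCheck (P : Nat → Prop) [DecidablePred P] (n : Nat) (a : Bool) :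
    (List.range n).foldl (fun ans k => if P k then false else ans) a
      = (a && decide (∀ k < n, ¬ P k)) := by
  induction n generalizing a with
  | zero => simp
  | succ m ih =>
    rw [List.range_succ, List.foldl_append]
    simp only [List.foldl_cons, List.foldl_nil, ih]
    by_cases hP : P m
    · simp only [if_pos hP]
      simp
      exact fun _ => ⟨m, le_refl m, hP⟩
    · simp only [if_neg hP]
      congr 1
      simp only [decide_eq_decide]
      constructor
      · intro h k hk
        rcases Nat.lt_or_ge k m with h' | h'
        · exact h k h'
        · have hk' : k = m := by omega
          subst hk'; exact hP
      · intro h k hk; exact h k (by omega)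

theorem pvCheckLoop_spec (O C : List Int) (a : Bool) :
    pvACheckLoop O C a = (a && decide (∀ k, (h : k < O.length) → O.getD k 0 ≤ C.getD k 0)) := by
  unfold pvACheckLoop
  rw [pvFoldCheck (fun k => O.getD k 0 > C.getD k 0)]
  congr 1
  simp only [decide_eq_decide]
  constructor
  · intro h k hk; exact le_of_not_gt (h k hk)
  · intro h k hk; exact not_lt_of_ge (h k hk)

-- per type: A's (equal lengths ∧ pointwise ≤) is exactly (okSpec ∧ balance = 0)
theorem pvTypeIff {O C : List Int} {n k0 : Int} (h : pvInvT O C n k0) :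
    ((O.length = C.length) ∧ (∀ k, (hk : k < O.length) → O.getD k 0 ≤ C.getD k 0))
      ↔ (pvOkSpec O C ∧ n = 0) := by
  obtain ⟨h1, _, _, h4⟩ := h
  have hlen : O.length = C.length ↔ n = 0 := by omega
  constructor
  · rintro ⟨he, hp⟩
    refine ⟨?_, hlen.1 he⟩
    intro j hj
    have hj' : j < O.length := by omega
    refine ⟨hj', ?_⟩
    have hle := hp j hj'
    rw [List.getD_eq_getElem O 0 hj', List.getD_eq_getElem C 0 hj] at hle
    rcases lt_or_eq_of_le hle with hlt | heq
    · exact hlt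
    · exact absurd (heq ▸ List.getElem_mem hj) (h4 _ (List.getElem_mem hj'))
  · rintro ⟨hok, hn⟩
    have he := hlen.2 hn
    refine ⟨he, ?_⟩
    intro k hk
    obtain ⟨_, hlt⟩ := hok k (by omega)
    rw [List.getD_eq_getElem O 0 hk, List.getD_eq_getElem C 0 (by omega)]
    exact le_of_lt hlt

-- the final states of the two scans decide the same verdict
theorem pvFinal (bg md sm : List Int × List Int) (p b q : Int) (ok : Bool) (k0 : Int)
    (h1 : pvInvT sm.1 sm.2 p k0) (h2 : pvInvT md.1 md.2 b k0) (h3 : pvInvT bg.1 bg.2 q k0)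
    (hok : ok = true ↔ (pvOkSpec sm.1 sm.2 ∧ pvOkSpec md.1 md.2 ∧ pvOkSpec bg.1 bg.2)) :
    pvVerdictA (bg, md, sm) = pvVerdictB (p, b, q, ok) := by
  have hA : pvVerdictA (bg, md, sm) = true ↔
      ((sm.1.length = sm.2.length ∧ ∀ k, (hk : k < sm.1.length) → sm.1.getD k 0 ≤ sm.2.getD k 0) ∧
       (md.1.length = md.2.length ∧ ∀ k, (hk : k < md.1.length) → md.1.getD k 0 ≤ md.2.getD k 0) ∧
       (bg.1.length = bg.2.length ∧ ∀ k, (hk : k < bg.1.length) → bg.1.getD k 0 ≤ bg.2.getD k 0)) := by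
    unfold pvVerdictA
    by_cases hne : sm.1.length ≠ sm.2.length ∨ md.1.length ≠ md.2.length ∨ bg.1.length ≠ bg.2.length
    · simp only [if_pos hne]
      constructor
      · intro h; exact absurd h (by simp)
      · rintro ⟨⟨hs, _⟩, ⟨hm, _⟩, ⟨hb, _⟩⟩; exact absurd hne (by tauto)
    · push_neg at hne
      obtain ⟨hs, hm, hb⟩ := hne
      simp only [if_neg (by tauto)]
      rw [pvCheckLoop_spec, pvCheckLoop_spec, pvCheckLoop_spec]
      simp [hs, hm, hb]
      tauto
  have hB : pvVerdictB (p, b, q, ok) = true ↔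
      ((pvOkSpec sm.1 sm.2 ∧ pvOkSpec md.1 md.2 ∧ pvOkSpec bg.1 bg.2) ∧ p = 0 ∧ b = 0 ∧ q = 0) := by
    unfold pvVerdictB
    simp [hok]
    tauto
  have := (pvTypeIff h1)
  have := (pvTypeIff h2)
  have := (pvTypeIff h3)
  cases hva : pvVerdictA (bg, md, sm) <;> cases hvb : pvVerdictB (p, b, q, ok) <;> try rfl
  · exfalso
    have hBh := hB.1 hvb
    have : pvVerdictA (bg, md, sm) = true := by
      rw [hA]
      exact ⟨(pvTypeIff h1).2 ⟨hBh.1.1, hBh.2.1⟩, (pvTypeIff h2).2 ⟨hBh.1.2.1, hBh.2.2.1⟩,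
             (pvTypeIff h3).2 ⟨hBh.1.2.2, hBh.2.2.2⟩⟩
    rw [hva] at this; exact Bool.false_ne_true this
  · exfalso
    have hAh := hA.1 hva
    have hs := (pvTypeIff h1).1 hAh.1
    have hm := (pvTypeIff h2).1 hAh.2.1
    have hb := (pvTypeIff h3).1 hAh.2.2
    have : pvVerdictB (p, b, q, ok) = true := by
      rw [hB]
      exact ⟨⟨hs.1, hm.1, hb.1⟩, hs.2, hm.2, hb.2⟩
    rw [hvb] at this; exact Bool.false_ne_true this

-- the main simulation: both folds, started in related states, end in states of equal verdict
theorem pvMain (l : List Char) (k0 : Int)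
    (bg md sm : List Int × List Int) (p b q : Int) (ok : Bool)
    (h1 : pvInvT sm.1 sm.2 p k0) (h2 : pvInvT md.1 md.2 b k0) (h3 : pvInvT bg.1 bg.2 q k0)
    (hok : ok = true ↔ (pvOkSpec sm.1 sm.2 ∧ pvOkSpec md.1 md.2 ∧ pvOkSpec bg.1 bg.2)) :
    pvVerdictA ((PySem.List.enumerate l k0).foldl pvAStep (bg, md, sm))
      = pvVerdictB (l.foldl pvBStep (p, b, q, ok)) := by
  induction l generalizing k0 bg md sm p b q ok with
  | nil =>
    simp only [PySem.List.enumerate_nil, List.foldl_nil]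
    exact pvFinal bg md sm p b q ok k0 h1 h2 h3 hok
  | cons ch rest ih =>
    rw [PySem.List.enumerate_cons, List.foldl_cons, List.foldl_cons]
    by_cases c1 : ch = '('
    · simp only [pvAStep, pvBStep, c1]
      exact ih (k0 + 1) bg md (sm.1 ++ [k0], sm.2) (p + 1) b q ok
        (pvInvT_open h1) (pvInvT_skip h2) (pvInvT_skip h3)
        (by rw [hok, pvOkSpec_open h1.2.2.1])
    · by_cases c2 : ch = ')'
      · simp only [pvAStep, pvBStep, c1, c2]
        refine ih (k0 + 1) bg md (sm.1, sm.2 ++ [k0]) (p - 1) b q _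
          (pvInvT_close h1) (pvInvT_skip h2) (pvInvT_skip h3) ?_
        rw [pvOkSpec_close h1.2.1]
        have hp : p - 1 < 0 ↔ ¬ sm.2.length < sm.1.length := by
          have := h1.1; omega
        by_cases hpc : p - 1 < 0
        · simp only [if_pos hpc]
          have := hp.1 hpc
          constructor
          · intro h; exact absurd h (by simp)
          · rintro ⟨⟨_, hl⟩, _, _⟩; exact absurd hl this
        · simp only [if_neg hpc]
          rw [hok]
          have hl : sm.2.length < sm.1.length := by
            by_contra hn; exact hpc (hp.2 hn)
          tauto
      · by_cases c3 : ch = '{'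
        · simp only [pvAStep, pvBStep, c1, c2, c3]
          exact ih (k0 + 1) bg (md.1 ++ [k0], md.2) sm p (b + 1) q ok
            (pvInvT_skip h1) (pvInvT_open h2) (pvInvT_skip h3)
            (by rw [hok, pvOkSpec_open h2.2.2.1])
        · by_cases c4 : ch = '}'
          · simp only [pvAStep, pvBStep, c1, c2, c3, c4]
            refine ih (k0 + 1) bg (md.1, md.2 ++ [k0]) sm p (b - 1) q _
              (pvInvT_skip h1) (pvInvT_close h2) (pvInvT_skip h3) ?_
            rw [pvOkSpec_close h2.2.1]
            have hp : b - 1 < 0 ↔ ¬ md.2.length < md.1.length := by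
              have := h2.1; omega
            by_cases hpc : b - 1 < 0
            · simp only [if_pos hpc]
              have := hp.1 hpc
              constructor
              · intro h; exact absurd h (by simp)
              · rintro ⟨_, ⟨_, hl⟩, _⟩; exact absurd hl this
            · simp only [if_neg hpc]
              rw [hok]
              have hl : md.2.length < md.1.length := by
                by_contra hn; exact hpc (hp.2 hn)
              tauto
          · by_cases c5 : ch = '['
            · simp only [pvAStep, pvBStep, c1, c2, c3, c4, c5]
              exact ih (k0 + 1) (bg.1 ++ [k0], bg.2) md sm p b (q + 1) ok
                (pvInvT_skip h1) (pvInvT_skip h2) (pvInvT_open h3)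
                (by rw [hok, pvOkSpec_open h3.2.2.1])
            · by_cases c6 : ch = ']'
              · simp only [pvAStep, pvBStep, c1, c2, c3, c4, c5, c6]
                refine ih (k0 + 1) (bg.1, bg.2 ++ [k0]) md sm p b (q - 1) _
                  (pvInvT_skip h1) (pvInvT_skip h2) (pvInvT_close h3) ?_
                rw [pvOkSpec_close h3.2.1]
                have hp : q - 1 < 0 ↔ ¬ bg.2.length < bg.1.length := by
                  have := h3.1; omega
                by_cases hpc : q - 1 < 0
                · simp only [if_pos hpc]
                  have := hp.1 hpc
                  constructor
                  · intro h; exact absurd h (by simp)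
                  · rintro ⟨_, _, _, hl⟩; exact absurd hl this
                · simp only [if_neg hpc]
                  rw [hok]
                  have hl : bg.2.length < bg.1.length := by
                    by_contra hn; exact hpc (hp.2 hn)
                  tauto
              · simp only [pvAStep, pvBStep, c1, c2, c3, c4, c5, c6]
                exact ih (k0 + 1) bg md sm p b q ok
                  (pvInvT_skip h1) (pvInvT_skip h2) (pvInvT_skip h3) hok

-- ===== VERDICT (by name: the statement is the Claim_ definition above) =====
theorem if_right_spec : Claim_equal_if_right := by
  intro s _
  unfold Spec_if_right if_right if_right_alt
  exact pvMain s.toList 0 ([], []) ([], []) ([], []) 0 0 0 true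
    ⟨by simp, by simp, by simp, by simp⟩ ⟨by simp, by simp, by simp, by simp⟩
    ⟨by simp, by simp, by simp, by simp⟩
    (by simp [pvOkSpec])
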